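-- pv_equiv track=rewrite | github.com/epolepole/HttpMonitor | workers/basic_stats_worker.py | __aggreagate_status_codes
-- ===== SOURCE A (Python) =====
-- def __aggreagate_status_codes(codes):
--     aggregated_codes = {
--         "2xx": 0,
--         "3xx": 0,
--         "4xx": 0,
--         "5xx": 0
--     }
--     for code, hits in codes.items():
--         if code[0] == "2":
--             aggregated_codes["2xx"] += hits
--         elif code[0] == "3":
--             aggregated_codes["3xx"] += hits
--         elif code[0] == "4":
--             aggregated_codes["4xx"] += hits
--         elif code[0] == "5":
--             aggregated_codes["5xx"] += hits
--     return aggregated_codes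
-- ===== SOURCE B (Python) =====
-- def __aggreagate_status_codes(codes):
--     return {f"{d}xx": sum(h for c, h in codes.items() if c[0] == d) for d in "2345"}
-- ===== Notes on version B (the rewrite author's own statement) =====
-- stated objective: idiomatic
-- what changed: A makes one pass over the codes, dispatching each entry into a mutable bucket dict via an if/elif chain; B builds the result as a dict comprehension over the four class digits '2345', computing each bucket with its own filtered sum over the entries.
import Mathlib
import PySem

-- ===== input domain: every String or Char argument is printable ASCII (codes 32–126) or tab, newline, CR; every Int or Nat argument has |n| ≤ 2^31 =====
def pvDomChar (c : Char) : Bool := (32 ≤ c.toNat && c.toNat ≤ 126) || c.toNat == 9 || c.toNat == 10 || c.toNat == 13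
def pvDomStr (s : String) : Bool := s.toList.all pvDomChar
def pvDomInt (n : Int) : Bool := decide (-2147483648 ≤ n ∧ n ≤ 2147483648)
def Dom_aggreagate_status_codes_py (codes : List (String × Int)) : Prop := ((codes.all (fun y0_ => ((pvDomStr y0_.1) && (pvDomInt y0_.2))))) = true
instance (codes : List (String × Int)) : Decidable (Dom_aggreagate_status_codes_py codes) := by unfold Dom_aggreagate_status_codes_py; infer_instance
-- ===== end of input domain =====

-- B replaces A's single branching dispatch loop with one filtered-sum pass per bucket class ('2','3','4','5'), built as a map over the class digits (idiomatic).


-- ===== PORT A =====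
-- loop body of A: dispatch one (code, hits) pair into the bucket dict
def pyAggStep (d : PySem.Dict String Int) (p : String × Int) : PySem.Dict String Int :=
  match PySem.Str.pyGet? p.1 0 with
  | some c =>
    if c == '2' then d.modify "2xx" 0 (· + p.2)
    else if c == '3' then d.modify "3xx" 0 (· + p.2)
    else if c == '4' then d.modify "4xx" 0 (· + p.2)
    else if c == '5' then d.modify "5xx" 0 (· + p.2)
    else d
  | none => d   -- Python raises IndexError here (code = ""); excluded by Pre_

def aggreagate_status_codes_py (codes : List (String × Int)) : List (String × Int) :=
  (codes.foldl pyAggStep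
    (PySem.Dict.mk [("2xx", 0), ("3xx", 0), ("4xx", 0), ("5xx", 0)])).items

-- ===== PORT B =====
-- sum(h for c, h in codes.items() if c[0] == d)
def pyBucketSum (codes : List (String × Int)) (d : Char) : Int :=
  ((codes.filter (fun p => PySem.Str.pyGet? p.1 0 == some d)).map (·.2)).sum

def aggreagate_status_codes_py_alt (codes : List (String × Int)) : List (String × Int) :=
  "2345".toList.map (fun d => (String.ofList [d, 'x', 'x'], pyBucketSum codes d))

-- ===== PRECONDITION & SPEC =====
-- Pre_ excludes inputs containing an empty-string status code: there code[0] raises IndexError in A (and in B).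
def Pre_aggreagate_status_codes_py (codes : List (String × Int)) : Prop :=
  ∀ p ∈ codes, p.1 ≠ ""
instance (codes : List (String × Int)) : Decidable (Pre_aggreagate_status_codes_py codes) := by unfold Pre_aggreagate_status_codes_py; infer_instance
def pvWitness_aggreagate_status_codes_py : (List (String × Int)) := [("200", 3), ("404", 1), ("abc", 7)]

def Spec_aggreagate_status_codes_py (codes : List (String × Int)) (out : List (String × Int)) : Prop := out = aggreagate_status_codes_py_alt codes
instance (codes : List (String × Int)) (out : List (String × Int)) : Decidable (Spec_aggreagate_status_codes_py codes out) := by unfold Spec_aggreagate_status_codes_py; infer_instance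

-- ===== CLAIM (what is proved, stated in full; the proofs are below) =====
def Claim_equal_aggreagate_status_codes_py : Prop := ∀ (codes : List (String × Int)), Dom_aggreagate_status_codes_py codes → Pre_aggreagate_status_codes_py codes → Spec_aggreagate_status_codes_py codes (aggreagate_status_codes_py codes)

-- ===== LEMMAS AND PROOFS =====
lemma pyBucketSum_cons (p : String × Int) (rest : List (String × Int)) (d : Char) :
    pyBucketSum (p :: rest) d =
      (if PySem.Str.pyGet? p.1 0 = some d then p.2 else 0) + pyBucketSum rest d := by
  simp [pyBucketSum, List.filter_cons]
  split_ifs with h <;> simp_all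

lemma agg_fold_items (codes : List (String × Int))
    (h : ∀ p ∈ codes, p.1 ≠ "") (a b c e : Int) :
    (codes.foldl pyAggStep
        (PySem.Dict.mk [("2xx", a), ("3xx", b), ("4xx", c), ("5xx", e)])).items
      = [("2xx", a + pyBucketSum codes '2'), ("3xx", b + pyBucketSum codes '3'),
         ("4xx", c + pyBucketSum codes '4'), ("5xx", e + pyBucketSum codes '5')] := by
  induction codes generalizing a b c e with
  | nil => simp [pyBucketSum]
  | cons p rest ih =>
    obtain ⟨ch, t, hct⟩ : ∃ ch t, p.1.toList = ch :: t := by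
      cases hs : p.1.toList with
      | nil => exact absurd (by simpa [String.toList_eq_nil_iff] using hs) (h p (by simp))
      | cons ch t => exact ⟨ch, t, rfl⟩
    have hget : PySem.List.pyGet? p.1.toList 0 = some ch := by
      rw [hct]; exact PySem.List.pyGet?_zero_cons _ _
    have hrest : ∀ q ∈ rest, q.1 ≠ "" := fun q hq => h q (List.mem_cons_of_mem _ hq)
    rw [List.foldl_cons]
    by_cases h2 : ch = '2'
    · subst h2
      have hstep : pyAggStep (PySem.Dict.mk [("2xx", a), ("3xx", b), ("4xx", c), ("5xx", e)]) p
          = PySem.Dict.mk [("2xx", a + p.2), ("3xx", b), ("4xx", c), ("5xx", e)] := by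
        simp [pyAggStep, hget, PySem.Dict.modify, PySem.Dict.getD, PySem.Dict.get?, PySem.Dict.insert]
      rw [hstep, ih hrest]
      simp [pyBucketSum_cons, hget]
      omega
    · by_cases h3 : ch = '3'
      · subst h3
        have hstep : pyAggStep (PySem.Dict.mk [("2xx", a), ("3xx", b), ("4xx", c), ("5xx", e)]) p
            = PySem.Dict.mk [("2xx", a), ("3xx", b + p.2), ("4xx", c), ("5xx", e)] := by
          simp [pyAggStep, hget, PySem.Dict.modify, PySem.Dict.getD, PySem.Dict.get?, PySem.Dict.insert]
        rw [hstep, ih hrest]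
        simp [pyBucketSum_cons, hget]
        omega
      · by_cases h4 : ch = '4'
        · subst h4
          have hstep : pyAggStep (PySem.Dict.mk [("2xx", a), ("3xx", b), ("4xx", c), ("5xx", e)]) p
              = PySem.Dict.mk [("2xx", a), ("3xx", b), ("4xx", c + p.2), ("5xx", e)] := by
            simp [pyAggStep, hget, PySem.Dict.modify, PySem.Dict.getD, PySem.Dict.get?, PySem.Dict.insert]
          rw [hstep, ih hrest]
          simp [pyBucketSum_cons, hget]
          omega
        · by_cases h5 : ch = '5'
          · subst h5
            have hstep : pyAggStep (PySem.Dict.mk [("2xx", a), ("3xx", b), ("4xx", c), ("5xx", e)]) p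
                = PySem.Dict.mk [("2xx", a), ("3xx", b), ("4xx", c), ("5xx", e + p.2)] := by
              simp [pyAggStep, hget, PySem.Dict.modify, PySem.Dict.getD, PySem.Dict.get?, PySem.Dict.insert]
            rw [hstep, ih hrest]
            simp [pyBucketSum_cons, hget]
            omega
          · have hstep : pyAggStep (PySem.Dict.mk [("2xx", a), ("3xx", b), ("4xx", c), ("5xx", e)]) p
                = PySem.Dict.mk [("2xx", a), ("3xx", b), ("4xx", c), ("5xx", e)] := by
              simp [pyAggStep, hget, h2, h3, h4, h5]
            rw [hstep, ih hrest]
            simp [pyBucketSum_cons, hget, h2, h3, h4, h5]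

-- ===== VERDICT (by name: the statement is the Claim_ definition above) =====
theorem aggreagate_status_codes_py_spec : Claim_equal_aggreagate_status_codes_py := by
  intro codes _ hpre
  unfold Spec_aggreagate_status_codes_py
  unfold aggreagate_status_codes_py aggreagate_status_codes_py_alt
  rw [agg_fold_items codes hpre 0 0 0 0]
  simp
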